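-- pv_equiv track=rewrite | github.com/bradenbird/advent-of-code-2023 | day1/day1.py | get_left_number
-- ===== SOURCE A (Python) =====
-- DIGIT_STRS = {
--     "one": 1,
--     "two": 2,
--     "three": 3,
--     "four": 4,
--     "five": 5,
--     "six": 6,
--     "seven": 7,
--     "eight": 8,
--     "nine": 9,
--     "zero": 0,
-- }
--
-- def get_left_number(line: str, digit_only: bool):
--     length = len(line)
--     start_index = 0
--     while start_index < length:
--         if line[start_index].isdigit():
--             return int(line[start_index])
--         if not digit_only:
--             for s, num in DIGIT_STRS.items():
--                 if line[start_index:].startswith(s):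
--                     return num
--         start_index += 1
--     # No matches, return 0
--     return 0
-- ===== SOURCE B (Python) =====
-- DIGIT_STRS = {
--     "one": 1,
--     "two": 2,
--     "three": 3,
--     "four": 4,
--     "five": 5,
--     "six": 6,
--     "seven": 7,
--     "eight": 8,
--     "nine": 9,
--     "zero": 0,
-- }
--
-- def get_left_number(line: str, digit_only: bool):
--     # min-over-finds: locate each candidate's first occurrence with str.find,
--     # keep the value whose occurrence is leftmost (candidate order breaks ties).
--     candidates = [(str(d), d) for d in range(10)]
--     if not digit_only:
--         candidates += list(DIGIT_STRS.items())
--     best_i = -1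
--     best_v = 0
--     for s, v in candidates:
--         i = line.find(s)
--         if i != -1 and (best_i == -1 or i < best_i):
--             best_i, best_v = i, v
--     return best_v
-- ===== Notes on version B (the rewrite author's own statement) =====
-- stated objective: faster
-- what changed: Replaces A's position-by-position left-to-right scan (digit test then per-word startswith at each index) by computing each candidate's leftmost occurrence once with str.find and returning the value whose occurrence index is smallest (candidate order breaks ties, matching A's priority).
import Mathlib
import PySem

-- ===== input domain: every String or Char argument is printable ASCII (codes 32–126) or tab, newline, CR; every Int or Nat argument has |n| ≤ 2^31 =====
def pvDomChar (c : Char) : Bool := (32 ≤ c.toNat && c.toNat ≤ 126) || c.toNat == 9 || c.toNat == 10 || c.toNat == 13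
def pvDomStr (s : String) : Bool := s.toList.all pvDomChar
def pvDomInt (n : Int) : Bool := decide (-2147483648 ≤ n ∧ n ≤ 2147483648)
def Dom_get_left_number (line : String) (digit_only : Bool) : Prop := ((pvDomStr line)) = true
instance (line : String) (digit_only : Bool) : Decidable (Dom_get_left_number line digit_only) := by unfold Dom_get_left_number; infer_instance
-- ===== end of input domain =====

-- B replaces A's per-position Python-level scan by one str.find per candidate combined by a minimum (constant-factor faster: the scan runs in C).

-- ===== PORT A =====
def DIGIT_STRS : List (String × Int) :=
  [("one", 1), ("two", 2), ("three", 3), ("four", 4), ("five", 5),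
   ("six", 6), ("seven", 7), ("eight", 8), ("nine", 9), ("zero", 0)]

-- inner 'for s, num in DIGIT_STRS.items(): if line[start_index:].startswith(s): return num'
def scanWords : List (String × Int) → List Char → Option Int
  | [], _ => none
  | (s, num) :: rest, cs =>
    if PySem.Chars.startswith cs s.toList then some num else scanWords rest cs

-- the while loop over start_index, as recursion on the suffix line[start_index:]
def goA (digit_only : Bool) : List Char → Int
  | [] => 0
  | c :: cs =>
    if PySem.Chars.strIsdigit [c] then (PySem.Int.ofStr? (String.mk [c])).getD 0  -- int() cannot fail on a digit char
    else if digit_only = false then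
      match scanWords DIGIT_STRS (c :: cs) with
      | some num => num
      | none => goA digit_only cs
    else goA digit_only cs

def get_left_number (line : String) (digit_only : Bool) : Int :=
  goA digit_only line.toList

-- ===== PORT B =====
def candList (digit_only : Bool) : List (String × Int) :=
  ((PySem.List.pyRange 0 10 1).map (fun d => (PySem.Int.toStr d, d)))
    ++ (if digit_only then [] else DIGIT_STRS)

def bStep (L : List Char) (st : Int × Int) (cand : String × Int) : Int × Int :=
  let i := PySem.Chars.find L cand.1.toList
  if i ≠ -1 ∧ (st.1 = -1 ∨ i < st.1) then (i, cand.2) else st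

def get_left_number_alt (line : String) (digit_only : Bool) : Int :=
  ((candList digit_only).foldl (bStep line.toList) (-1, 0)).2

-- ===== PRECONDITION & SPEC =====
def Spec_get_left_number (line : String) (digit_only : Bool) (out : Int) : Prop := out = get_left_number_alt line digit_only
instance (line : String) (digit_only : Bool) (out : Int) : Decidable (Spec_get_left_number line digit_only out) := by unfold Spec_get_left_number; infer_instance

-- ===== CLAIM (what is proved, stated in full; the proofs are below) =====
def Claim_equal_get_left_number : Prop := ∀ (line : String) (digit_only : Bool), Dom_get_left_number line digit_only → Spec_get_left_number line digit_only (get_left_number line digit_only)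

-- ===== LEMMAS AND PROOFS =====

-- first candidate whose string is a prefix of L (proof-side characterisation of position-0 matching)
def firstMatch : List (String × Int) → List Char → Option Int
  | [], _ => none
  | (s, num) :: rest, cs =>
    if s.toList <+: cs then some num else firstMatch rest cs

lemma scanWords_eq_firstMatch (W : List (String × Int)) (L : List Char) :
    scanWords W L = firstMatch W L := by
  induction W with
  | nil => rfl
  | cons p rest ih =>
    obtain ⟨s, num⟩ := p
    simp only [scanWords, firstMatch, ih]
    by_cases h : s.toList <+: L
    · rw [if_pos ((PySem.Chars.startswith_iff _ _).mpr h), if_pos h]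
    · rw [if_neg (fun hb => h ((PySem.Chars.startswith_iff _ _).mp hb)), if_neg h]

lemma infix_iff_exists_drop (sub s : List Char) :
    sub <:+: s ↔ ∃ j, sub <+: s.drop j := by
  rw [← PySem.Chars.isIn_iff_infix, ← PySem.Chars.exists_prefix_drop_iff_isIn]

lemma find_prefix_zero {s sub : List Char} (h : sub <+: s) : PySem.Chars.find s sub = 0 := by
  have hinf : sub <:+: s := (infix_iff_exists_drop sub s).mpr ⟨0, by simpa using h⟩
  have hnn : 0 ≤ PySem.Chars.find s sub := (PySem.Chars.find_nonneg_iff s sub).mpr hinf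
  obtain ⟨-, hmin⟩ := PySem.Chars.find_spec hnn
  by_contra hne
  have hpos : 0 < (PySem.Chars.find s sub).toNat := by omega
  exact hmin 0 hpos (by simpa using h)

lemma find_cons (c : Char) (cs sub : List Char) :
    PySem.Chars.find (c :: cs) sub =
      if sub <+: (c :: cs) then 0
      else if PySem.Chars.find cs sub = -1 then -1 else PySem.Chars.find cs sub + 1 := by
  by_cases hp : sub <+: (c :: cs)
  · rw [if_pos hp]; exact find_prefix_zero hp
  · rw [if_neg hp]
    by_cases hg : PySem.Chars.find cs sub = -1
    · rw [if_pos hg]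
      rw [PySem.Chars.find_eq_neg_one_iff]
      intro hinf
      obtain ⟨j, hj⟩ := (infix_iff_exists_drop sub _).mp hinf
      cases j with
      | zero => exact hp (by simpa using hj)
      | succ k =>
        rw [List.drop_succ_cons] at hj
        have : sub <:+: cs := (infix_iff_exists_drop sub cs).mpr ⟨k, hj⟩
        have := (PySem.Chars.find_nonneg_iff cs sub).mpr this
        omega
    · rw [if_neg hg]
      have hg0 : 0 ≤ PySem.Chars.find cs sub := by
        have := PySem.Chars.neg_one_le_find cs sub; omega
      obtain ⟨hgp, hgmin⟩ := PySem.Chars.find_spec hg0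
      set g := PySem.Chars.find cs sub with hgdef
      have hpre : sub <+: (c :: cs).drop (g.toNat + 1) := by
        rw [List.drop_succ_cons]; exact hgp
      have hinf : sub <:+: (c :: cs) := (infix_iff_exists_drop sub _).mpr ⟨g.toNat + 1, hpre⟩
      have hf0 : 0 ≤ PySem.Chars.find (c :: cs) sub := (PySem.Chars.find_nonneg_iff _ sub).mpr hinf
      obtain ⟨hfp, hfmin⟩ := PySem.Chars.find_spec hf0
      set f := PySem.Chars.find (c :: cs) sub with hfdef
      have hfne : f.toNat ≠ 0 := by
        intro h0; rw [h0] at hfp; exact hp (by simpa using hfp)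
      have hle : f.toNat ≤ g.toNat + 1 := by
        by_contra hlt
        exact hfmin (g.toNat + 1) (by omega) hpre
      have hge : g.toNat ≤ f.toNat - 1 := by
        by_contra hlt
        have hpre' : sub <+: cs.drop (f.toNat - 1) := by
          have : (c :: cs).drop f.toNat = cs.drop (f.toNat - 1) := by
            conv_lhs => rw [show f.toNat = (f.toNat - 1) + 1 by omega]
            exact List.drop_succ_cons
          rwa [this] at hfp
        exact hgmin (f.toNat - 1) (by omega) hpre'
      omega

-- once the best index is 0, the fold never changes state again
lemma foldl_stay_zero (C : List (String × Int)) (L : List Char) (v : Int) :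
    C.foldl (bStep L) (0, v) = (0, v) := by
  induction C with
  | nil => rfl
  | cons p rest ih =>
    have h1 : -1 ≤ PySem.Chars.find L p.1.toList := PySem.Chars.neg_one_le_find _ _
    simp only [List.foldl_cons, bStep]
    rw [if_neg (by omega)]
    exact ih

lemma firstMatch_none_no_prefix {C : List (String × Int)} {L : List Char}
    (h : firstMatch C L = none) : ∀ p ∈ C, ¬ p.1.toList <+: L := by
  induction C with
  | nil => intro p hp; simp at hp
  | cons q rest ih =>
    intro p hp
    obtain ⟨s, num⟩ := q
    simp only [firstMatch] at h
    by_cases hq : s.toList <+: L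
    · rw [if_pos hq] at h; exact absurd h (by simp)
    · rw [if_neg hq] at h
      rcases List.mem_cons.mp hp with rfl | hmem
      · exact hq
      · exact ih h p hmem

lemma foldl_first_some {C : List (String × Int)} {L : List Char} {v : Int} :
    ∀ bi bv, (bi = -1 ∨ 0 < bi) → firstMatch C L = some v →
      (C.foldl (bStep L) (bi, bv)).2 = v := by
  induction C with
  | nil => intro bi bv _ h; exact absurd h (by simp [firstMatch])
  | cons p rest ih =>
    intro bi bv hinv h
    obtain ⟨s, num⟩ := p
    simp only [firstMatch] at h
    simp only [List.foldl_cons, bStep]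
    by_cases hq : s.toList <+: L
    · rw [if_pos hq] at h
      rw [find_prefix_zero hq]
      rw [if_pos (by constructor <;> omega)]
      rw [foldl_stay_zero]
      simpa using h
    · rw [if_neg hq] at h
      have h1 : -1 ≤ PySem.Chars.find L s.toList := PySem.Chars.neg_one_le_find _ _
      have h0 : PySem.Chars.find L s.toList ≠ 0 := by
        intro h0
        have := (PySem.Chars.find_nonneg_iff L s.toList).mp (by omega)
        obtain ⟨hpr, -⟩ := PySem.Chars.find_spec (le_of_eq h0.symm)
        rw [h0] at hpr; simp at hpr
        exact hq hpr
      split_ifs with hc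
      · exact ih _ _ (by omega) h
      · exact ih _ _ hinv h

def shiftRel (bi bi' : Int) : Prop := (bi = -1 ∧ bi' = -1) ∨ (0 ≤ bi' ∧ bi = bi' + 1)

lemma foldl_shift {c : Char} {cs : List Char} :
    ∀ (C : List (String × Int)), (∀ p ∈ C, ¬ p.1.toList <+: (c :: cs)) →
    ∀ bi bi' bv, shiftRel bi bi' →
      shiftRel (C.foldl (bStep (c :: cs)) (bi, bv)).1 (C.foldl (bStep cs) (bi', bv)).1 ∧
      (C.foldl (bStep (c :: cs)) (bi, bv)).2 = (C.foldl (bStep cs) (bi', bv)).2 := by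
  intro C
  induction C with
  | nil => intro _ bi bi' bv h; exact ⟨h, rfl⟩
  | cons p rest ih =>
    intro hnp bi bi' bv hrel
    have hph : ¬ p.1.toList <+: (c :: cs) := hnp p (List.mem_cons_self ..)
    have hrest : ∀ q ∈ rest, ¬ q.1.toList <+: (c :: cs) := fun q hq => hnp q (List.mem_cons_of_mem _ hq)
    simp only [List.foldl_cons, bStep]
    rw [find_cons, if_neg hph]
    have hg1 : -1 ≤ PySem.Chars.find cs p.1.toList := PySem.Chars.neg_one_le_find _ _
    by_cases hg : PySem.Chars.find cs p.1.toList = -1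
    · rw [if_pos hg, hg]
      rw [if_neg (by simp), if_neg (by simp)]
      exact ih hrest bi bi' bv hrel
    · rw [if_neg hg]
      set g := PySem.Chars.find cs p.1.toList with hgdef
      rcases hrel with ⟨h1, h2⟩ | ⟨h1, h2⟩
      · subst h1; subst h2
        rw [if_pos (by constructor <;> omega), if_pos (by constructor <;> omega)]
        exact ih hrest _ _ _ (Or.inr ⟨by omega, rfl⟩)
      · subst h2
        by_cases hlt : g < bi'
        · rw [if_pos (by constructor <;> omega), if_pos (by constructor <;> omega)]
          exact ih hrest _ _ _ (Or.inr ⟨by omega, rfl⟩)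
        · rw [if_neg (by omega), if_neg (by omega)]
          exact ih hrest _ _ _ (Or.inr ⟨h1, rfl⟩)

lemma foldl_nil_line (C : List (String × Int)) (hne : ∀ p ∈ C, p.1.toList ≠ []) :
    C.foldl (bStep []) (-1, 0) = (-1, 0) := by
  induction C with
  | nil => rfl
  | cons p rest ih =>
    have hp : PySem.Chars.find [] p.1.toList = -1 := by
      rw [PySem.Chars.find_eq_neg_one_iff]
      intro hinf
      exact hne p (List.mem_cons_self ..) (List.eq_nil_of_infix_nil hinf)
    simp only [List.foldl_cons, bStep, hp]
    rw [if_neg (by simp)]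
    exact ih fun q hq => hne q (List.mem_cons_of_mem _ hq)

lemma firstMatch_append (X Y : List (String × Int)) (L : List Char) :
    firstMatch (X ++ Y) L = (firstMatch X L).orElse (fun _ => firstMatch Y L) := by
  induction X with
  | nil => rfl
  | cons p rest ih =>
    obtain ⟨s, num⟩ := p
    simp only [List.cons_append, firstMatch]
    split_ifs <;> simp [ih]

def digitCands : List (String × Int) :=
  [("0", 0), ("1", 1), ("2", 2), ("3", 3), ("4", 4),
   ("5", 5), ("6", 6), ("7", 7), ("8", 8), ("9", 9)]

lemma candList_eq (d : Bool) :
    candList d = digitCands ++ (if d then [] else DIGIT_STRS) := by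
  cases d <;> rfl

lemma char_eq_of_toNat {c d : Char} (h : c.toNat = d.toNat) : c = d :=
  Char.ext (by exact UInt32.toNat_inj.mp h)

lemma digit_enum {c : Char} (h : PySem.Chars.isdigit c = true) :
    c = '0' ∨ c = '1' ∨ c = '2' ∨ c = '3' ∨ c = '4' ∨
    c = '5' ∨ c = '6' ∨ c = '7' ∨ c = '8' ∨ c = '9' := by
  simp only [PySem.Chars.isdigit, Bool.and_eq_true, decide_eq_true_eq] at h
  obtain ⟨h1, h2⟩ := h
  have hl : 48 ≤ c.toNat := by
    simpa using (Char.le_def.mp h1)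
  have hr : c.toNat ≤ 57 := by
    simpa using (Char.le_def.mp h2)
  interval_cases h : c.toNat <;>
    [ exact Or.inl (char_eq_of_toNat h);
      exact Or.inr (Or.inl (char_eq_of_toNat h));
      exact Or.inr (Or.inr (Or.inl (char_eq_of_toNat h)));
      exact Or.inr (Or.inr (Or.inr (Or.inl (char_eq_of_toNat h))));
      exact Or.inr (Or.inr (Or.inr (Or.inr (Or.inl (char_eq_of_toNat h)))));
      exact Or.inr (Or.inr (Or.inr (Or.inr (Or.inr (Or.inl (char_eq_of_toNat h))))));
      exact Or.inr (Or.inr (Or.inr (Or.inr (Or.inr (Or.inr (Or.inl (char_eq_of_toNat h)))))));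
      exact Or.inr (Or.inr (Or.inr (Or.inr (Or.inr (Or.inr (Or.inr (Or.inl (char_eq_of_toNat h))))))));
      exact Or.inr (Or.inr (Or.inr (Or.inr (Or.inr (Or.inr (Or.inr (Or.inr (Or.inl (char_eq_of_toNat h)))))))));
      exact Or.inr (Or.inr (Or.inr (Or.inr (Or.inr (Or.inr (Or.inr (Or.inr (Or.inr (char_eq_of_toNat h)))))))))]

lemma firstMatch_digit {c : Char} (cs : List Char) (h : PySem.Chars.isdigit c = true) :
    firstMatch digitCands (c :: cs) = some ((PySem.Int.ofStr? (String.mk [c])).getD 0) := by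
  rcases digit_enum h with rfl | rfl | rfl | rfl | rfl | rfl | rfl | rfl | rfl | rfl <;>
    simp [digitCands, firstMatch, List.cons_prefix_cons] <;> decide

lemma not_prefix_digit (a c : Char) (cs : List Char) (ha : PySem.Chars.isdigit a = true)
    (h : PySem.Chars.isdigit c = false) : ¬ [a] <+: (c :: cs) := by
  intro hp
  rcases List.cons_prefix_cons.mp hp with ⟨rfl, -⟩
  rw [ha] at h
  exact absurd h (by simp)

lemma firstMatch_nondigit {c : Char} (cs : List Char) (h : PySem.Chars.isdigit c = false) :
    firstMatch digitCands (c :: cs) = none := by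
  simp only [digitCands, firstMatch]
  rw [show ("0" : String).toList = ['0'] from rfl, show ("1" : String).toList = ['1'] from rfl,
      show ("2" : String).toList = ['2'] from rfl, show ("3" : String).toList = ['3'] from rfl,
      show ("4" : String).toList = ['4'] from rfl, show ("5" : String).toList = ['5'] from rfl,
      show ("6" : String).toList = ['6'] from rfl, show ("7" : String).toList = ['7'] from rfl,
      show ("8" : String).toList = ['8'] from rfl, show ("9" : String).toList = ['9'] from rfl]
  rw [if_neg (not_prefix_digit '0' c cs (by decide) h),
      if_neg (not_prefix_digit '1' c cs (by decide) h),
      if_neg (not_prefix_digit '2' c cs (by decide) h),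
      if_neg (not_prefix_digit '3' c cs (by decide) h),
      if_neg (not_prefix_digit '4' c cs (by decide) h),
      if_neg (not_prefix_digit '5' c cs (by decide) h),
      if_neg (not_prefix_digit '6' c cs (by decide) h),
      if_neg (not_prefix_digit '7' c cs (by decide) h),
      if_neg (not_prefix_digit '8' c cs (by decide) h),
      if_neg (not_prefix_digit '9' c cs (by decide) h)]

lemma strIsdigit_single (c : Char) : PySem.Chars.strIsdigit [c] = PySem.Chars.isdigit c := by
  simp [PySem.Chars.strIsdigit]

lemma goA_eq_fold (d : Bool) (L : List Char) :
    goA d L = ((candList d).foldl (bStep L) (-1, 0)).2 := by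
  induction L with
  | nil =>
    rw [foldl_nil_line]
    · rfl
    · cases d <;> decide
  | cons c cs ih =>
    cases hfm : firstMatch (candList d) (c :: cs) with
    | some v =>
      rw [foldl_first_some (-1) 0 (Or.inl rfl) hfm]
      rw [candList_eq, firstMatch_append] at hfm
      by_cases hdig : PySem.Chars.isdigit c = true
      · rw [firstMatch_digit cs hdig] at hfm
        simp only [Option.orElse_some] at hfm
        simp only [goA, strIsdigit_single, hdig, if_pos]
        simpa using hfm
      · have hdig' : PySem.Chars.isdigit c = false := by
          cases hq : PySem.Chars.isdigit c
          · rfl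
          · exact absurd hq hdig
        rw [firstMatch_nondigit cs hdig'] at hfm
        simp [Option.orElse] at hfm
        cases d with
        | true => simp [firstMatch] at hfm
        | false =>
          simp only [goA, strIsdigit_single, hdig']
          rw [if_neg (by simp), if_pos trivial]
          rw [scanWords_eq_firstMatch]
          have : DIGIT_STRS = DIGIT_STRS := rfl
          rw [this]
          simp at hfm
          rw [hfm]
    | none =>
      have hnp := firstMatch_none_no_prefix hfm
      have hshift := foldl_shift (c := c) (cs := cs) (candList d) hnp (-1) (-1) 0 (Or.inl ⟨rfl, rfl⟩)
      rw [hshift.2, ← ih]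
      -- A side: neither a digit at position 0 nor a word match
      have hdig' : PySem.Chars.isdigit c = false := by
        cases hq : PySem.Chars.isdigit c
        · rfl
        · exfalso
          rw [candList_eq, firstMatch_append, firstMatch_digit cs hq] at hfm
          simp at hfm
      cases d with
      | true => simp [goA, strIsdigit_single, hdig']
      | false =>
        simp only [goA, strIsdigit_single, hdig']
        rw [if_neg (by simp), if_pos trivial]
        rw [scanWords_eq_firstMatch]
        rw [candList_eq, firstMatch_append, firstMatch_nondigit cs hdig'] at hfm
        simp [Option.orElse] at hfm
        rw [hfm]

-- ===== VERDICT (by name: the statement is the Claim_ definition above) =====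
theorem get_left_number_spec : Claim_equal_get_left_number := by
  intro line d _
  unfold Spec_get_left_number get_left_number get_left_number_alt
  exact goA_eq_fold d line.toList
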